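-- pv_equiv track=rewrite | github.com/megumi-ben/work13-wd | PNS/baselines/pns_pmns_v1/factor_extractor.py | _estimate_island_len
-- ===== SOURCE A (Python) =====
-- from typing import List, Optional, Tuple
--
-- def _estimate_island_len(raw: str) -> Tuple[int, Optional[int]]:
--     i = 0
--     n = len(raw)
--     min_len = 0
--     max_len: Optional[int] = 0
--     while i < n:
--         ch = raw[i]
--         if ch == "[":
--             j = raw.find("]", i + 1)
--             if j == -1:
--                 return min_len, None
--             token_min = token_max = 1
--             k = j + 1
--             if k < n and raw[k] == "{":
--                 k += 1
--                 num1 = ""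
--                 while k < n and raw[k].isdigit():
--                     num1 += raw[k]
--                     k += 1
--                 if k < n and raw[k] == ",":
--                     k += 1
--                     num2 = ""
--                     while k < n and raw[k].isdigit():
--                         num2 += raw[k]
--                         k += 1
--                     if k < n and raw[k] == "}":
--                         token_min = int(num1) if num1 else 0
--                         token_max = int(num2) if num2 else token_min
--                         k += 1
--                     else:
--                         return min_len, None
--                 elif k < n and raw[k] == "}":
--                     if not num1:
--                         return min_len, None
--                     token_min = token_max = int(num1)
--                     k += 1
--                 else:
--                     return min_len, None
--             min_len += token_min
--             if max_len is not None:
--                 max_len += token_max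
--             i = k
--             continue
--         if ch.isalnum() or ch == "_":
--             j = i
--             while j < n and (raw[j].isalnum() or raw[j] == "_"):
--                 j += 1
--             token = raw[i:j]
--             token_len = len(token)
--             i = j
--             # optional quantifier {a,b}
--             if i < n and raw[i] == "{":
--                 i += 1
--                 num1 = ""
--                 while i < n and raw[i].isdigit():
--                     num1 += raw[i]
--                     i += 1
--                 if i < n and raw[i] == ",":
--                     i += 1
--                     num2 = ""
--                     while i < n and raw[i].isdigit():
--                         num2 += raw[i]
--                         i += 1
--                     if i < n and raw[i] == "}":
--                         a = int(num1) if num1 else 0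
--                         b = int(num2) if num2 else a
--                         i += 1
--                     else:
--                         return min_len, None
--                 elif i < n and raw[i] == "}":
--                     if not num1:
--                         return min_len, None
--                     a = b = int(num1)
--                     i += 1
--                 else:
--                     return min_len, None
--                 min_len += token_len * a
--                 if max_len is not None:
--                     max_len += token_len * b
--             else:
--                 min_len += token_len
--                 if max_len is not None:
--                     max_len += token_len
--             continue
--         # unknown/complex char => max unknown
--         max_len = None
--         i += 1
--     return min_len, max_len
-- ===== SOURCE B (Python) =====
-- from typing import List, Optional, Tuple
--
-- def _split_first(s: str, ch: str):
--     """Split s at the first occurrence of ch: (before, after), or None if absent."""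
--     head, sep, tail = s.partition(ch)
--     return (head, tail) if sep else None
--
-- def _quant(raw: str, p: int):
--     """Parse an optional {a}/{a,b} quantifier starting at position p.
--     Returns (a, b, next_pos) -- (1, 1, p) when absent -- or None when malformed."""
--     if p >= len(raw) or raw[p] != "{":
--         return 1, 1, p
--     e = raw.find("}", p + 1)
--     if e == -1:
--         return None
--     body = raw[p + 1:e]
--     two = _split_first(body, ",")
--     if two is None:
--         if not body.isdigit():
--             return None
--         a = b = int(body)
--     else:
--         n1, n2 = two
--         if "," in n2:
--             return None
--         if (n1 and not n1.isdigit()) or (n2 and not n2.isdigit()):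
--             return None
--         a = int(n1) if n1 else 0
--         b = int(n2) if n2 else a
--     return a, b, e + 1
--
-- def _estimate_island_len(raw: str) -> Tuple[int, Optional[int]]:
--     n = len(raw)
--     parts = []            # (min_add, max_add) contribution of each token
--     unbounded = False     # an unknown char made the upper bound unknown
--     fatal = False         # malformed syntax: stop, upper bound unknown
--     i = 0
--     while i < n and not fatal:
--         ch = raw[i]
--         if ch == "[":
--             j = raw.find("]", i + 1)
--             q = None if j == -1 else _quant(raw, j + 1)
--             if q is None:
--                 fatal = True
--             else:
--                 a, b, i = q
--                 parts.append((a, b))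
--         elif ch.isalnum() or ch == "_":
--             j = next((k for k in range(i, n) if not (raw[k].isalnum() or raw[k] == "_")), n)
--             w = j - i
--             q = _quant(raw, j)
--             if q is None:
--                 fatal = True
--             else:
--                 a, b, i = q
--                 parts.append((w * a, w * b))
--         else:
--             unbounded = True
--             i += 1
--     lo = sum(a for a, _ in parts)
--     if fatal or unbounded:
--         return lo, None
--     return lo, sum(b for _, b in parts)
-- ===== Notes on version B (the rewrite author's own statement) =====
-- stated objective: alternative
-- what changed: A's char-by-char automaton that builds digit strings one character at a time and threads min/Optional-max accumulators through one flat while-loop is replaced by substring-level parsing (str.find/partition to cut out the {...} body, isdigit validation of whole slices) that collects per-token (min,max) contribution pairs into a list plus unbounded/fatal flags, with the two bounds computed afterwards by sum() over the collected pairs.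
import Mathlib
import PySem

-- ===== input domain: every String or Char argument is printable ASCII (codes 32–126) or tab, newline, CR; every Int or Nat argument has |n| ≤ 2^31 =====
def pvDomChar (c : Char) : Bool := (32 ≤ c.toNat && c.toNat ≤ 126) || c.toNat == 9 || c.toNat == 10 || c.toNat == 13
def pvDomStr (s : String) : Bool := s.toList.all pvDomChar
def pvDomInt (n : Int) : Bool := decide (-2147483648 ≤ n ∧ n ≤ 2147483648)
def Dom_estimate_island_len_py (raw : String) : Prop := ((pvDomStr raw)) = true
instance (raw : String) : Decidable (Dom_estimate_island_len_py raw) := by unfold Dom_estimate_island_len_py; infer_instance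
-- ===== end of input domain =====

-- B replaces A's char-by-char automaton (digit strings built one char at a time, min/Optional-max
-- threaded through one flat loop) by substring-level parsing (split at the first ']'/'}'/',',
-- whole-slice isdigit checks) that collects per-token (min,max) pairs plus unbounded/fatal flags
-- and computes both bounds afterwards by summation (objective: alternative decomposition; same cost).

-- shared one-liner for "ch.isalnum() or ch == '_'" appearing in both Pythons
def isWordChar (c : Char) : Bool := PySem.Chars.isalnum c || c == '_'

-- ===== PORT A =====
-- raw.find("]", i + 1) followed by the jump to j + 1 (the class body is unused), fused
def aSkipRBrack : List Char → Option (List Char)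
  | [] => none
  | c :: t => if c = ']' then some t else aSkipRBrack t

-- suffix-length facts cited by the ports' termination proofs
theorem aSkipRBrack_length {t r : List Char} (h : aSkipRBrack t = some r) :
    r.length < t.length := by
  induction t with
  | nil => simp [aSkipRBrack] at h
  | cons c t ih =>
    simp only [aSkipRBrack] at h
    split at h
    · cases h; simp
    · have := ih h; simp; omega

-- each digit-collecting while loop and the word-run scan of A are List.span (prefix, rest)
theorem span_eq_len {p : Char → Bool} {l num r : List Char}
    (h : List.span p l = (num, r)) : r.length ≤ l.length := by
  have h2 : (List.span p l).2 = r := by rw [h]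
  rw [List.span_eq_takeWhile_dropWhile] at h2
  rw [← h2]
  exact List.length_dropWhile_le p l

theorem span_cons_pos_snd {p : Char → Bool} {c : Char} {t tok r : List Char}
    (hc : p c = true) (h : List.span p (c :: t) = (tok, r)) : r.length ≤ t.length := by
  have h2 : (List.span p (c :: t)).2 = r := by rw [h]
  rw [List.span_eq_takeWhile_dropWhile, List.dropWhile_cons_of_pos hc] at h2
  rw [← h2]
  exact List.length_dropWhile_le p t

def aLoop : List Char → Int → Option Int → Int × Option Int
  | [], m, M => (m, M)
  | c :: t, m, M =>
    if c = '[' then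
      match h1 : aSkipRBrack t with
      | none => (m, none)
      | some r =>
        match h2 : r with
        | '{' :: r1 =>
          match h3 : r1.span (fun d => PySem.Chars.isdigit d) with
          | (num1, r2) =>
            match h4 : r2 with
            | ',' :: r3 =>
              match h5 : r3.span (fun d => PySem.Chars.isdigit d) with
              | (num2, r4) =>
                match h6 : r4 with
                | '}' :: r5 =>
                  let tmin : Int := if num1 = [] then 0 else (PySem.Int.ofChars? num1).getD 0
                  let tmax : Int := if num2 = [] then tmin else (PySem.Int.ofChars? num2).getD 0
                  aLoop r5 (m + tmin) (M.map (· + tmax))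
                | _ => (m, none)
            | '}' :: r3 =>
              if num1 = [] then (m, none)
              else aLoop r3 (m + (PySem.Int.ofChars? num1).getD 0)
                     (M.map (· + (PySem.Int.ofChars? num1).getD 0))
            | _ => (m, none)
        | _ => aLoop r (m + 1) (M.map (· + 1))
    else if hw : isWordChar c then
      match h7 : (c :: t).span isWordChar with
      | (tok, r) =>
        let L : Int := (tok.length : Int)
        match h8 : r with
        | '{' :: r1 =>
          match h9 : r1.span (fun d => PySem.Chars.isdigit d) with
          | (num1, r2) =>
            match h10 : r2 with
            | ',' :: r3 =>
              match h11 : r3.span (fun d => PySem.Chars.isdigit d) with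
              | (num2, r4) =>
                match h12 : r4 with
                | '}' :: r5 =>
                  let a : Int := if num1 = [] then 0 else (PySem.Int.ofChars? num1).getD 0
                  let b : Int := if num2 = [] then a else (PySem.Int.ofChars? num2).getD 0
                  aLoop r5 (m + L * a) (M.map (· + L * b))
                | _ => (m, none)
            | '}' :: r3 =>
              if num1 = [] then (m, none)
              else aLoop r3 (m + L * (PySem.Int.ofChars? num1).getD 0)
                     (M.map (· + L * (PySem.Int.ofChars? num1).getD 0))
            | _ => (m, none)
        | _ => aLoop r (m + L) (M.map (· + L))
    else aLoop t m none
termination_by l _ _ => l.length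
decreasing_by
  · have hb := aSkipRBrack_length h1
    have s1 := span_eq_len h3
    have s2 := span_eq_len h5
    simp only [List.length_cons] at *; omega
  · have hb := aSkipRBrack_length h1
    have s1 := span_eq_len h3
    simp only [List.length_cons] at *; omega
  · rw [h2]
    have hb := aSkipRBrack_length h1
    simp only [List.length_cons] at *; omega
  · have s0 := span_cons_pos_snd hw h7
    have s1 := span_eq_len h9
    have s2 := span_eq_len h11
    simp only [List.length_cons] at *; omega
  · have s0 := span_cons_pos_snd hw h7
    have s1 := span_eq_len h9
    simp only [List.length_cons] at *; omega
  · rw [h8]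
    have s0 := span_cons_pos_snd hw h7
    simp only [List.length_cons] at *; omega
  · simp

def estimate_island_len_py (raw : String) : Int × Option Int :=
  aLoop raw.toList 0 (some 0)

-- ===== PORT B =====
-- _split_first: s.partition(ch) = (before, after) at the FIRST ch, None when absent
-- (exact for a 1-char separator; also models raw.find(ch, p) fused with the resuming slice)
def splitAtFirst (ch : Char) : List Char → Option (List Char × List Char)
  | [] => none
  | c :: t => if c = ch then some ([], t) else (splitAtFirst ch t).map (fun p => (c :: p.1, p.2))

theorem splitAtFirst_snd_length {ch : Char} {l bdy r : List Char}
    (h : splitAtFirst ch l = some (bdy, r)) : r.length < l.length := by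
  induction l generalizing bdy with
  | nil => simp [splitAtFirst] at h
  | cons c t ih =>
    simp only [splitAtFirst] at h
    split at h
    · cases h; simp
    · rcases hs : splitAtFirst ch t with _ | ⟨b2, r2⟩
      · rw [hs] at h; cases h
      · rw [hs] at h
        simp only [Option.map_some] at h
        cases h
        have := ih hs
        simp; omega

-- _quant: optional {a}/{a,b} at the front of the suffix; the {...} body is cut out with
-- find('}') and validated as whole slices ('"," in n2' is ported as contains, exact for one char)
def bQuant : List Char → Option (Int × Int × List Char)
  | [] => some (1, 1, [])
  | c :: s1 =>
    if c = '{' then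
      match splitAtFirst '}' s1 with
      | none => none
      | some (body, rest) =>
        match splitAtFirst ',' body with
        | none =>
          if PySem.Chars.strIsdigit body then
            some ((PySem.Int.ofChars? body).getD 0, (PySem.Int.ofChars? body).getD 0, rest)
          else none
        | some (n1, n2) =>
          if n2.contains ',' then none
          else if (!n1.isEmpty && !PySem.Chars.strIsdigit n1)
                  || (!n2.isEmpty && !PySem.Chars.strIsdigit n2) then none
          else
            let a : Int := if n1 = [] then 0 else (PySem.Int.ofChars? n1).getD 0
            let b : Int := if n2 = [] then a else (PySem.Int.ofChars? n2).getD 0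
            some (a, b, rest)
    else some (1, 1, c :: s1)

theorem bQuant_length {s : List Char} {a b : Int} {r' : List Char}
    (h : bQuant s = some (a, b, r')) : r'.length ≤ s.length := by
  rcases s with _ | ⟨c, s1⟩
  · simp only [bQuant, Option.some.injEq, Prod.mk.injEq] at h
    obtain ⟨-, -, h⟩ := h; subst h; exact le_refl _
  · simp only [bQuant] at h
    split at h
    · split at h
      · exact absurd h (by simp)
      · rename_i body rest hs
        have hlen := splitAtFirst_snd_length hs
        split at h
        · split at h
          · simp only [Option.some.injEq, Prod.mk.injEq] at h
            obtain ⟨-, -, h⟩ := h; subst h; simp; omega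
          · exact absurd h (by simp)
        · split at h
          · exact absurd h (by simp)
          · split at h
            · exact absurd h (by simp)
            · simp only [Option.some.injEq, Prod.mk.injEq] at h
              obtain ⟨-, -, h⟩ := h; subst h; simp; omega
    · simp only [Option.some.injEq, Prod.mk.injEq] at h
      obtain ⟨-, -, h⟩ := h; subst h; exact le_refl _

-- the scanning loop of B's main function: collects (min,max) pairs and the two flags
def bScan : List Char → List (Int × Int) → Bool → List (Int × Int) × Bool × Bool
  | [], acc, ub => (acc, ub, false)
  | c :: t, acc, ub =>
    if c = '[' then
      match h1 : splitAtFirst ']' t with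
      | none => (acc, ub, true)
      | some (_, r) =>
        match h2 : bQuant r with
        | none => (acc, ub, true)
        | some (a, b, r') => bScan r' (acc ++ [(a, b)]) ub
    else if hw : isWordChar c then
      match h3 : bQuant ((c :: t).dropWhile isWordChar) with
      | none => (acc, ub, true)
      | some (a, b, r') =>
          bScan r' (acc ++ [((((c :: t).takeWhile isWordChar).length : Int) * a,
                             (((c :: t).takeWhile isWordChar).length : Int) * b)]) ub
    else bScan t acc true
termination_by l _ _ => l.length
decreasing_by
  · have hb := splitAtFirst_snd_length h1
    have hq := bQuant_length h2
    simp only [List.length_cons] at *; omega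
  · have hd : ((c :: t).dropWhile isWordChar).length ≤ t.length := by
      rw [List.dropWhile_cons_of_pos hw]; exact List.length_dropWhile_le _ _
    have hq := bQuant_length h3
    simp only [List.length_cons] at *; omega
  · simp

def estimate_island_len_py_alt (raw : String) : Int × Option Int :=
  match bScan raw.toList [] false with
  | (parts, unbounded, fatal) =>
    let lo := (parts.map Prod.fst).sum
    if fatal || unbounded then (lo, none)
    else (lo, some ((parts.map Prod.snd).sum))

-- ===== PRECONDITION & SPEC =====
def Spec_estimate_island_len_py (raw : String) (out : Int × Option Int) : Prop := out = estimate_island_len_py_alt raw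
instance (raw : String) (out : Int × Option Int) : Decidable (Spec_estimate_island_len_py raw out) := by unfold Spec_estimate_island_len_py; infer_instance

-- ===== CLAIM (what is proved, stated in full; the proofs are below) =====
def Claim_equal_estimate_island_len_py : Prop := ∀ (raw : String), Dom_estimate_island_len_py raw → Spec_estimate_island_len_py raw (estimate_island_len_py raw)

-- ===== LEMMAS AND PROOFS =====
-- proof-only reference form of A's quantifier parsing (span-shaped, mirrors aLoop's inline code)
def qSpec : List Char → Option (Int × Int × List Char)
  | '{' :: r1 =>
    match r1.span (fun d => PySem.Chars.isdigit d) with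
    | (num1, r2) =>
      match r2 with
      | ',' :: r3 =>
        match r3.span (fun d => PySem.Chars.isdigit d) with
        | (num2, r4) =>
          match r4 with
          | '}' :: r5 =>
            let a : Int := if num1 = [] then 0 else (PySem.Int.ofChars? num1).getD 0
            let b : Int := if num2 = [] then a else (PySem.Int.ofChars? num2).getD 0
            some (a, b, r5)
          | _ => none
      | '}' :: r3 =>
        if num1 = [] then none
        else some ((PySem.Int.ofChars? num1).getD 0, (PySem.Int.ofChars? num1).getD 0, r3)
      | _ => none
  | r => some (1, 1, r)

theorem qSpec_comma {r1 num1 r3 num2 r5 : List Char}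
    (h1 : List.span (fun d => PySem.Chars.isdigit d) r1 = (num1, ',' :: r3))
    (h2 : List.span (fun d => PySem.Chars.isdigit d) r3 = (num2, '}' :: r5)) :
    qSpec ('{' :: r1) = some (if num1 = [] then 0 else (PySem.Int.ofChars? num1).getD 0,
      if num2 = [] then (if num1 = [] then 0 else (PySem.Int.ofChars? num1).getD 0)
      else (PySem.Int.ofChars? num2).getD 0, r5) := by
  simp only [qSpec, h1, h2]

theorem qSpec_comma_bad {r1 num1 r3 num2 r4 : List Char}
    (h1 : List.span (fun d => PySem.Chars.isdigit d) r1 = (num1, ',' :: r3))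
    (h2 : List.span (fun d => PySem.Chars.isdigit d) r3 = (num2, r4))
    (h3 : ∀ r5, r4 ≠ '}' :: r5) :
    qSpec ('{' :: r1) = none := by
  simp only [qSpec, h1, h2]

theorem qSpec_close {r1 num1 r3 : List Char}
    (h1 : List.span (fun d => PySem.Chars.isdigit d) r1 = (num1, '}' :: r3)) :
    qSpec ('{' :: r1) = if num1 = [] then none
      else some ((PySem.Int.ofChars? num1).getD 0, (PySem.Int.ofChars? num1).getD 0, r3) := by
  simp only [qSpec, h1]

theorem qSpec_bad {r1 num1 r2 : List Char}
    (h1 : List.span (fun d => PySem.Chars.isdigit d) r1 = (num1, r2))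
    (h2 : ∀ r3, r2 ≠ ',' :: r3) (h3 : ∀ r3, r2 ≠ '}' :: r3) :
    qSpec ('{' :: r1) = none := by
  simp only [qSpec, h1]

theorem qSpec_no_curly {r : List Char} (h : ∀ r1, r ≠ '{' :: r1) :
    qSpec r = some (1, 1, r) := by
  unfold qSpec
  split <;> first
    | rfl
    | (exact absurd rfl (h _))

-- A's step shapes, expressed through qSpec
theorem aLoop_bracket (t r : List Char) (m : Int) (M : Option Int)
    (hf : aSkipRBrack t = some r) :
    aLoop ('[' :: t) m M =
      match qSpec r with
      | none => (m, none)
      | some (a, b, r') => aLoop r' (m + a) (M.map (· + b)) := by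
  rw [aLoop.eq_def]
  simp only [reduceIte]
  split
  · rename_i heq; rw [hf] at heq; cases heq
  · rename_i r0 heq
    rw [hf] at heq; injection heq with heq; subst heq
    split
    · split
      · rename_i r1 hA hB hx r3 hs1 hs1b hq1 hq2
        split
        · rename_i r5 hs2 hs2b hp1 hp2
          rw [qSpec_comma hs1 hs2]
        · rename_i hno
          have hs2 := (Prod.mk.eta (p := List.span (fun d => PySem.Chars.isdigit d) r3)).symm
          have hne : ∀ r5, (List.span (fun d => PySem.Chars.isdigit d) r3).2 ≠ '}' :: r5 := by
            intro r5 hr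
            exact hno r5 ((Prod.mk.eta).symm.trans (by rw [hr])) hr (proof_irrel_heq _ _)
          rw [qSpec_comma_bad hs1 hs2 hne]
      · rename_i r1 hA hB hx r3 hs1 hs1b hq1 hq2
        rw [qSpec_close hs1]
        split_ifs with hn <;> rfl
      · rename_i r1 hA hB hetab hno1 hno2
        have hne1 : ∀ r3, (List.span (fun d => PySem.Chars.isdigit d) r1).2 ≠ ',' :: r3 := by
          intro r3 hr
          exact hno1 r3 ((Prod.mk.eta).symm.trans (by rw [hr])) hr (proof_irrel_heq _ _)
        have hne2 : ∀ r3, (List.span (fun d => PySem.Chars.isdigit d) r1).2 ≠ '}' :: r3 := by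
          intro r3 hr
          exact hno2 r3 ((Prod.mk.eta).symm.trans (by rw [hr])) hr (proof_irrel_heq _ _)
        rw [qSpec_bad (Prod.mk.eta (p := List.span (fun d => PySem.Chars.isdigit d) r1)).symm hne1 hne2]
    · rename_i hsk hno
      have hne : ∀ r1, r ≠ '{' :: r1 := by
        intro r1 hr
        exact hno r1 (hr ▸ hsk) hr (proof_irrel_heq _ _)
      rw [qSpec_no_curly hne]

theorem aLoop_bracket_none (t : List Char) (m : Int) (M : Option Int)
    (hf : aSkipRBrack t = none) : aLoop ('[' :: t) m M = (m, none) := by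
  rw [aLoop.eq_def]
  simp only [reduceIte]
  split
  · rfl
  · rename_i r heq; rw [hf] at heq; cases heq

theorem aLoop_word (c : Char) (t tok r : List Char) (m : Int) (M : Option Int)
    (hc : ¬ c = '[') (hw : isWordChar c = true)
    (hsp : List.span isWordChar (c :: t) = (tok, r)) :
    aLoop (c :: t) m M =
      match qSpec r with
      | none => (m, none)
      | some (a, b, r') =>
          aLoop r' (m + (tok.length : Int) * a) (M.map (· + (tok.length : Int) * b)) := by
  have htok : (List.span isWordChar (c :: t)).1 = tok := by rw [hsp]
  have hr : (List.span isWordChar (c :: t)).2 = r := by rw [hsp]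
  rw [aLoop.eq_def]
  simp only [if_neg hc]
  rw [dif_pos hw]
  split
  · rename_i r1 hA hB hq heqx
    have hr1 : r = '{' :: r1 := by rw [← hr, hq]
    subst hr1
    split
    · rename_i r3 hs1 hs1b hq1 hq2
      split
      · rename_i r5 hs2 hs2b hp1 hp2
        rw [qSpec_comma hs1 hs2]
        simp only [htok]
      · rename_i hno
        have hs2 := (Prod.mk.eta (p := List.span (fun d => PySem.Chars.isdigit d) r3)).symm
        have hne : ∀ r5, (List.span (fun d => PySem.Chars.isdigit d) r3).2 ≠ '}' :: r5 := by
          intro r5 hrr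
          exact hno r5 ((Prod.mk.eta).symm.trans (by rw [hrr])) hrr (proof_irrel_heq _ _)
        rw [qSpec_comma_bad hs1 hs2 hne]
    · rename_i r3 hs1 hs1b hq1 hq2
      rw [qSpec_close hs1]
      split_ifs with hn
      · rfl
      · simp only [htok]
    · rename_i hetab hno1 hno2
      have hne1 : ∀ r3, (List.span (fun d => PySem.Chars.isdigit d) r1).2 ≠ ',' :: r3 := by
        intro r3 hrr
        exact hno1 r3 ((Prod.mk.eta).symm.trans (by rw [hrr])) hrr (proof_irrel_heq _ _)
      have hne2 : ∀ r3, (List.span (fun d => PySem.Chars.isdigit d) r1).2 ≠ '}' :: r3 := by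
        intro r3 hrr
        exact hno2 r3 ((Prod.mk.eta).symm.trans (by rw [hrr])) hrr (proof_irrel_heq _ _)
      rw [qSpec_bad (Prod.mk.eta (p := List.span (fun d => PySem.Chars.isdigit d) r1)).symm hne1 hne2]
  · rename_i hsk hno
    have hne : ∀ r1, r ≠ '{' :: r1 := by
      intro r1 hrr
      rw [← hr] at hrr
      exact hno r1 (hrr ▸ hsk) hrr (proof_irrel_heq _ _)
    rw [qSpec_no_curly hne]
    simp only [hr, htok, mul_one]

theorem aLoop_unknown (c : Char) (t : List Char) (m : Int) (M : Option Int)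
    (hc : ¬ c = '[') (hw : ¬ isWordChar c = true) :
    aLoop (c :: t) m M = aLoop t m none := by
  rw [aLoop.eq_def]
  simp only [if_neg hc]
  rw [dif_neg hw]

-- splitAtFirst facts
theorem splitAtFirst_cons_self (ch : Char) (l : List Char) :
    splitAtFirst ch (ch :: l) = some ([], l) := by
  simp [splitAtFirst]

theorem splitAtFirst_cons_ne {ch c : Char} (h : ¬ c = ch) (l : List Char) :
    splitAtFirst ch (c :: l) = (splitAtFirst ch l).map (fun p => (c :: p.1, p.2)) := by
  simp [splitAtFirst, h]

theorem splitAtFirst_eq_none {ch : Char} {l : List Char} (h : ch ∉ l) :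
    splitAtFirst ch l = none := by
  induction l with
  | nil => rfl
  | cons c t ih =>
    simp only [List.mem_cons, not_or] at h
    have hc : ¬ c = ch := fun hc => h.1 hc.symm
    rw [splitAtFirst_cons_ne hc, ih h.2]
    rfl

theorem splitAtFirst_append_not_mem {ch : Char} {pre : List Char} (l : List Char)
    (h : ch ∉ pre) :
    splitAtFirst ch (pre ++ l) = (splitAtFirst ch l).map (fun p => (pre ++ p.1, p.2)) := by
  induction pre with
  | nil =>
    simp only [List.nil_append]
    cases splitAtFirst ch l <;> simp
  | cons a pre ih =>
    simp only [List.mem_cons, not_or] at h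
    rw [List.cons_append, splitAtFirst_cons_ne (fun hc => h.1 hc.symm) _, ih h.2]
    cases splitAtFirst ch l <;> simp

theorem skip_rel (t : List Char) : aSkipRBrack t = (splitAtFirst ']' t).map (fun p => p.2) := by
  induction t with
  | nil => rfl
  | cons c t ih =>
    simp only [aSkipRBrack, splitAtFirst]
    split
    · simp
    · rw [ih]; cases splitAtFirst ']' t <;> simp

-- digit-character facts
theorem digit_ne_rbrace {c : Char} (h : PySem.Chars.isdigit c = true) : ¬ c = '}' := by
  rintro rfl; exact absurd h (by decide)

theorem digit_ne_comma {c : Char} (h : PySem.Chars.isdigit c = true) : ¬ c = ',' := by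
  rintro rfl; exact absurd h (by decide)

theorem rbrace_not_mem_digits {l : List Char} (h : ∀ c ∈ l, PySem.Chars.isdigit c = true) :
    '}' ∉ l := fun hm => digit_ne_rbrace (h _ hm) rfl

theorem comma_not_mem_digits {l : List Char} (h : ∀ c ∈ l, PySem.Chars.isdigit c = true) :
    ',' ∉ l := fun hm => digit_ne_comma (h _ hm) rfl

theorem strIsdigit_of_digits {l : List Char} (hne : l ≠ [])
    (h : ∀ c ∈ l, PySem.Chars.isdigit c = true) : PySem.Chars.strIsdigit l = true := by
  have h1 : l.isEmpty = false := by simpa using hne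
  simp only [PySem.Chars.strIsdigit, h1, Bool.not_false, Bool.true_and]
  exact List.all_eq_true.mpr h

theorem strIsdigit_mid {d : Char} (xs ys : List Char)
    (hd : ¬ PySem.Chars.isdigit d = true) :
    PySem.Chars.strIsdigit (xs ++ d :: ys) = false := by
  simp only [PySem.Chars.strIsdigit]
  simp [List.all_append, hd]

theorem contains_comma_digits {l : List Char}
    (h : ∀ c ∈ l, PySem.Chars.isdigit c = true) : l.contains ',' = false := by
  simp only [List.contains_eq_mem, decide_eq_false_iff_not]
  exact comma_not_mem_digits h

-- the three facts a span hypothesis carries (prefix+rest, all-digits, rest's head not a digit)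
theorem span_facts {l n r : List Char}
    (h : List.span (fun d => PySem.Chars.isdigit d) l = (n, r)) :
    l = n ++ r ∧ (∀ c ∈ n, PySem.Chars.isdigit c = true) ∧
    (∀ d t, r = d :: t → PySem.Chars.isdigit d = false) := by
  rw [List.span_eq_takeWhile_dropWhile] at h
  have hn : n = l.takeWhile (fun d => PySem.Chars.isdigit d) := (congrArg Prod.fst h).symm
  have hr : r = l.dropWhile (fun d => PySem.Chars.isdigit d) := (congrArg Prod.snd h).symm
  refine ⟨?_, ?_, ?_⟩
  · rw [hn, hr, List.takeWhile_append_dropWhile]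
  · intro c hm; rw [hn] at hm; exact List.mem_takeWhile_imp hm
  · intro d t hdt
    have hdt' : l.dropWhile (fun d => PySem.Chars.isdigit d) = d :: t := hr.symm.trans hdt
    have hne : l.dropWhile (fun d => PySem.Chars.isdigit d) ≠ [] := by simp [hdt']
    have h2 := List.head_dropWhile_not (fun d => PySem.Chars.isdigit d) hne
    simp only [hdt'] at h2
    simpa using h2

-- the two quantifier parsers agree on every suffix
theorem quant_eq (s : List Char) : bQuant s = qSpec s := by
  rcases s with _ | ⟨c, s1⟩
  · rfl
  · by_cases hc : c = '{'
    · subst hc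
      rcases hsp : List.span (fun d => PySem.Chars.isdigit d) s1 with ⟨num1, r2⟩
      obtain ⟨hs1, hd1, hstop1⟩ := span_facts hsp
      have hbq : bQuant ('{' :: s1) =
          (match splitAtFirst '}' s1 with
           | none => none
           | some (body, rest) =>
             match splitAtFirst ',' body with
             | none =>
               if PySem.Chars.strIsdigit body then
                 some ((PySem.Int.ofChars? body).getD 0, (PySem.Int.ofChars? body).getD 0, rest)
               else none
             | some (n1, n2) =>
               if n2.contains ',' then none
               else if (!n1.isEmpty && !PySem.Chars.strIsdigit n1)
                       || (!n2.isEmpty && !PySem.Chars.strIsdigit n2) then none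
               else
                 let a : Int := if n1 = [] then 0 else (PySem.Int.ofChars? n1).getD 0
                 let b : Int := if n2 = [] then a else (PySem.Int.ofChars? n2).getD 0
                 some (a, b, rest)) := by
        simp [bQuant]
      rcases r2 with _ | ⟨d, r3⟩
      · -- no stopper at all: all of s1 is digits, no '}' anywhere
        rw [qSpec_bad hsp (by intro r3 h; cases h) (by intro r3 h; cases h), hbq]
        rw [List.append_nil] at hs1
        rw [hs1, splitAtFirst_eq_none (rbrace_not_mem_digits hd1)]
      · have hdstop : ¬ PySem.Chars.isdigit d = true := by
          rw [hstop1 d r3 rfl]; simp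
        by_cases hdc : d = ','
        · subst hdc
          rcases hsp2 : List.span (fun d => PySem.Chars.isdigit d) r3 with ⟨num2, r4⟩
          obtain ⟨hs3, hd2, hstop2⟩ := span_facts hsp2
          rcases r4 with _ | ⟨e, r5⟩
          · -- "…{num1,num2" with no '}' afterwards
            rw [qSpec_comma_bad hsp hsp2 (by intro r5 h; cases h), hbq]
            rw [List.append_nil] at hs3
            have hmem : '}' ∉ num1 ++ ',' :: num2 := by
              simp only [List.mem_append, List.mem_cons, not_or]
              exact ⟨rbrace_not_mem_digits hd1, by decide, rbrace_not_mem_digits hd2⟩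
            rw [hs1, hs3, splitAtFirst_eq_none hmem]
          · by_cases he : e = '}'
            · subst he
              rw [qSpec_comma hsp hsp2, hbq, hs1, hs3]
              have hpre : '}' ∉ num1 ++ ',' :: num2 := by
                simp only [List.mem_append, List.mem_cons, not_or]
                exact ⟨rbrace_not_mem_digits hd1, by decide, rbrace_not_mem_digits hd2⟩
              rw [show num1 ++ ',' :: (num2 ++ '}' :: r5) = (num1 ++ ',' :: num2) ++ '}' :: r5 by simp]
              rw [splitAtFirst_append_not_mem _ hpre, splitAtFirst_cons_self]
              simp only [Option.map_some, List.append_nil]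
              rw [splitAtFirst_append_not_mem _ (comma_not_mem_digits hd1), splitAtFirst_cons_self]
              simp only [Option.map_some, List.append_nil]
              rw [contains_comma_digits hd2]
              have hdig1 : (!num1.isEmpty && !PySem.Chars.strIsdigit num1) = false := by
                rcases num1 with _ | ⟨x, xs⟩
                · rfl
                · rw [strIsdigit_of_digits (by simp) hd1]; simp
              have hdig2 : (!num2.isEmpty && !PySem.Chars.strIsdigit num2) = false := by
                rcases num2 with _ | ⟨x, xs⟩
                · rfl
                · rw [strIsdigit_of_digits (by simp) hd2]; simp
              simp only [hdig1, hdig2, Bool.or_self, if_neg Bool.false_ne_true]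
            · -- after num2 comes a char that is neither a digit nor '}'
              have hestop : ¬ PySem.Chars.isdigit e = true := by
                rw [hstop2 e r5 rfl]; simp
              rw [qSpec_comma_bad hsp hsp2 (by intro r6 hx; cases hx; exact he rfl), hbq]
              rw [hs1, hs3]
              rw [show num1 ++ ',' :: (num2 ++ e :: r5) = (num1 ++ ',' :: num2 ++ [e]) ++ r5 by simp]
              have hpre : '}' ∉ num1 ++ ',' :: num2 ++ [e] := by
                simp only [List.mem_append, List.mem_cons, List.not_mem_nil, or_false, not_or]
                refine ⟨⟨rbrace_not_mem_digits hd1, by decide, rbrace_not_mem_digits hd2⟩, ?_⟩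
                intro hx; exact he hx.symm
              rw [splitAtFirst_append_not_mem _ hpre]
              rcases hfr : splitAtFirst '}' r5 with _ | ⟨body3, rest⟩
              · rfl
              · simp only [Option.map_some]
                rw [show num1 ++ ',' :: num2 ++ [e] ++ body3 = num1 ++ ',' :: (num2 ++ e :: body3) by simp]
                rw [splitAtFirst_append_not_mem _ (comma_not_mem_digits hd1), splitAtFirst_cons_self]
                simp only [Option.map_some, List.append_nil]
                by_cases hcon : (num2 ++ e :: body3).contains ',' = true
                · rw [hcon]; rfl
                · rw [Bool.not_eq_true] at hcon
                  rw [hcon]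
                  rw [strIsdigit_mid num2 body3 hestop]
                  simp
        · by_cases hdr : d = '}'
          · subst hdr
            rw [qSpec_close hsp, hbq, hs1]
            rw [splitAtFirst_append_not_mem _ (rbrace_not_mem_digits hd1), splitAtFirst_cons_self]
            simp only [Option.map_some, List.append_nil]
            rw [splitAtFirst_eq_none (comma_not_mem_digits hd1)]
            rcases num1 with _ | ⟨x, xs⟩
            · rfl
            · rw [strIsdigit_of_digits (by simp) hd1]
              simp
          · -- stopper d is neither digit, ',' nor '}'
            rw [qSpec_bad hsp (by intro r6 hx; cases hx; exact hdc rfl)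
                  (by intro r6 hx; cases hx; exact hdr rfl), hbq]
            rw [hs1, show num1 ++ d :: r3 = (num1 ++ [d]) ++ r3 by simp]
            have hpre : '}' ∉ num1 ++ [d] := by
              simp only [List.mem_append, List.mem_cons, List.not_mem_nil, or_false, not_or]
              exact ⟨rbrace_not_mem_digits hd1, fun hx => hdr hx.symm⟩
            rw [splitAtFirst_append_not_mem _ hpre]
            rcases hfr : splitAtFirst '}' r3 with _ | ⟨body3, rest⟩
            · rfl
            · simp only [Option.map_some]
              have hpre2 : ',' ∉ num1 ++ [d] := by
                simp only [List.mem_append, List.mem_cons, List.not_mem_nil, or_false, not_or]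
                exact ⟨comma_not_mem_digits hd1, fun hx => hdc hx.symm⟩
              rw [splitAtFirst_append_not_mem _ hpre2]
              rcases hfc : splitAtFirst ',' body3 with _ | ⟨p, q⟩
              · simp only [Option.map_none]
                rw [show num1 ++ [d] ++ body3 = num1 ++ d :: body3 by simp]
                rw [strIsdigit_mid num1 body3 hdstop]
                rfl
              · simp only [Option.map_some]
                by_cases hcon : q.contains ',' = true
                · rw [hcon]; rfl
                · rw [Bool.not_eq_true] at hcon
                  rw [hcon]
                  rw [show num1 ++ [d] ++ p = num1 ++ d :: p by simp]
                  rw [strIsdigit_mid num1 p hdstop]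
                  simp
    · rw [qSpec_no_curly (by intro r1 hx; cases hx; exact hc rfl)]
      simp [bQuant, hc]

-- B's step shapes
theorem bScan_nil (acc : List (Int × Int)) (ub : Bool) : bScan [] acc ub = (acc, ub, false) := by
  rw [bScan.eq_def]

theorem bScan_bracket_none (t : List Char) (acc : List (Int × Int)) (ub : Bool)
    (hf : splitAtFirst ']' t = none) : bScan ('[' :: t) acc ub = (acc, ub, true) := by
  rw [bScan.eq_def]
  simp only [reduceIte]
  split
  · rfl
  · rename_i p heq; rw [hf] at heq; cases heq

theorem bScan_bracket (t bdy r : List Char) (acc : List (Int × Int)) (ub : Bool)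
    (hf : splitAtFirst ']' t = some (bdy, r)) :
    bScan ('[' :: t) acc ub =
      match bQuant r with
      | none => (acc, ub, true)
      | some (a, b, r') => bScan r' (acc ++ [(a, b)]) ub := by
  rw [bScan.eq_def]
  simp only [reduceIte]
  split
  · rename_i heq; rw [hf] at heq; cases heq
  · rename_i b0 r0 heq
    rw [hf] at heq
    injection heq with heq
    injection heq with h1 h2
    subst h2
    split
    · rename_i heq2; rw [heq2]
    · rename_i a b r' heq2; rw [heq2]

theorem bScan_word (c : Char) (t : List Char) (acc : List (Int × Int)) (ub : Bool)
    (hc : ¬ c = '[') (hw : isWordChar c = true) :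
    bScan (c :: t) acc ub =
      match bQuant ((c :: t).dropWhile isWordChar) with
      | none => (acc, ub, true)
      | some (a, b, r') =>
          bScan r' (acc ++ [((((c :: t).takeWhile isWordChar).length : Int) * a,
                             (((c :: t).takeWhile isWordChar).length : Int) * b)]) ub := by
  rw [bScan.eq_def]
  simp only [if_neg hc]
  rw [dif_pos hw]
  split
  · rename_i heq2; rw [heq2]
  · rename_i a b r' heq2; rw [heq2]

theorem bScan_unknown (c : Char) (t : List Char) (acc : List (Int × Int)) (ub : Bool)
    (hc : ¬ c = '[') (hw : ¬ isWordChar c = true) :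
    bScan (c :: t) acc ub = bScan t acc true := by
  rw [bScan.eq_def]
  simp only [if_neg hc]
  rw [dif_neg hw]

-- shorthands for the three components of a scan started from the empty state
def scanPs (l : List Char) : List (Int × Int) := (bScan l [] false).1
def scanUb (l : List Char) : Bool := (bScan l [] false).2.1
def scanF (l : List Char) : Bool := (bScan l [] false).2.2

-- the accumulator and the unbounded flag factor out of bScan
theorem bScan_acc : ∀ (n : Nat) (l : List Char), l.length ≤ n →
    ∀ acc ub, bScan l acc ub = (acc ++ scanPs l, ub || scanUb l, scanF l) := by
  intro n
  induction n with
  | zero =>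
    intro l hl acc ub
    have h0 : l = [] := by cases l with | nil => rfl | cons c t => simp at hl
    subst h0
    simp [bScan_nil, scanPs, scanUb, scanF]
  | succ n ih =>
    intro l hl acc ub
    rcases l with _ | ⟨c, t⟩
    · simp [bScan_nil, scanPs, scanUb, scanF]
    · simp only [List.length_cons] at hl
      by_cases hc : c = '['
      · subst hc
        rcases hf : splitAtFirst ']' t with _ | ⟨bdy, r⟩
        · simp [bScan_bracket_none t _ _ hf, scanPs, scanUb, scanF]
        · have hlr := splitAtFirst_snd_length hf
          have hstep := bScan_bracket t bdy r acc ub hf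
          have hsc := bScan_bracket t bdy r [] false hf
          rcases hq : bQuant r with _ | ⟨a, b, r'⟩
          · rw [hq] at hstep hsc
            simp only [scanPs, scanUb, scanF, hsc, hstep]
            simp
          · have hlq := bQuant_length hq
            rw [hq] at hstep hsc
            simp only [List.nil_append] at hstep hsc
            rw [ih r' (by omega) [(a, b)] false] at hsc
            rw [ih r' (by omega) (acc ++ [(a, b)]) ub] at hstep
            simp only [scanPs, scanUb, scanF, hsc, hstep]
            simp
      · by_cases hw : isWordChar c
        · have hd : ((c :: t).dropWhile isWordChar).length ≤ t.length := by
            rw [List.dropWhile_cons_of_pos hw]; exact List.length_dropWhile_le _ _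
          have hstep := bScan_word c t acc ub hc hw
          have hsc := bScan_word c t [] false hc hw
          rcases hq : bQuant ((c :: t).dropWhile isWordChar) with _ | ⟨a, b, r'⟩
          · rw [hq] at hstep hsc
            simp only [scanPs, scanUb, scanF, hsc, hstep]
            simp
          · have hlq := bQuant_length hq
            rw [hq] at hstep hsc
            simp only [List.nil_append] at hstep hsc
            rw [ih r' (by omega) _ false] at hsc
            rw [ih r' (by omega) _ ub] at hstep
            simp only [scanPs, scanUb, scanF, hsc, hstep]
            simp
        · have hstep := bScan_unknown c t acc ub hc hw
          have hsc := bScan_unknown c t [] false hc hw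
          rw [ih t (by omega) [] true] at hsc
          rw [ih t (by omega) acc true] at hstep
          simp only [scanPs, scanUb, scanF, hsc, hstep]
          simp

-- the main agreement: A's loop state is exactly B's summed contributions
theorem main_eq : ∀ (n : Nat) (l : List Char), l.length ≤ n → ∀ (m : Int) (M : Option Int),
    aLoop l m M = (m + ((scanPs l).map Prod.fst).sum,
      if scanF l || scanUb l then none
      else M.map (· + ((scanPs l).map Prod.snd).sum)) := by
  intro n
  induction n with
  | zero =>
    intro l hl m M
    have h0 : l = [] := by cases l with | nil => rfl | cons c t => simp at hl
    subst h0
    rw [aLoop.eq_def]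
    simp only [scanPs, scanUb, scanF, bScan_nil]
    cases M <;> simp
  | succ n ih =>
    intro l hl m M
    rcases l with _ | ⟨c, t⟩
    · rw [aLoop.eq_def]
      simp only [scanPs, scanUb, scanF, bScan_nil]
      cases M <;> simp
    · simp only [List.length_cons] at hl
      by_cases hc : c = '['
      · subst hc
        rcases hf' : splitAtFirst ']' t with _ | ⟨bdy, r⟩
        · have hfa : aSkipRBrack t = none := by
            rw [skip_rel, hf']; rfl
          rw [aLoop_bracket_none t m M hfa]
          have hsc := bScan_bracket_none t [] false hf'
          simp only [scanPs, scanUb, scanF, hsc]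
          simp
        · have hfa : aSkipRBrack t = some r := by
            rw [skip_rel, hf']; rfl
          have hlr := splitAtFirst_snd_length hf'
          rw [aLoop_bracket t r m M hfa, ← quant_eq r]
          have hsc := bScan_bracket t bdy r [] false hf'
          rcases hq : bQuant r with _ | ⟨a, b, r'⟩
          · rw [hq] at hsc
            simp only [scanPs, scanUb, scanF, hsc]
            simp
          · have hlq := bQuant_length hq
            rw [hq] at hsc
            simp only [List.nil_append] at hsc
            rw [bScan_acc n r' (by omega) [(a, b)] false] at hsc
            simp only [scanPs, scanUb, scanF, hsc]
            rw [ih r' (by omega) (m + a) (M.map (· + b))]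
            simp only [scanPs, scanUb, scanF, List.cons_append, List.nil_append,
              List.map_cons, List.sum_cons, Bool.false_or, Prod.mk.injEq]
            refine ⟨by ring, ?_⟩
            split
            · rfl
            · cases M <;> simp <;> ring
      · by_cases hw : isWordChar c
        · rcases hsp : List.span isWordChar (c :: t) with ⟨tok, r⟩
          have hr : r = (c :: t).dropWhile isWordChar := by
            rw [List.span_eq_takeWhile_dropWhile] at hsp
            exact (congrArg Prod.snd hsp).symm
          have htok : tok = (c :: t).takeWhile isWordChar := by
            rw [List.span_eq_takeWhile_dropWhile] at hsp
            exact (congrArg Prod.fst hsp).symm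
          have hlr : r.length ≤ t.length := span_cons_pos_snd hw hsp
          rw [aLoop_word c t tok r m M hc hw hsp, ← quant_eq r]
          have hsc := bScan_word c t [] false hc hw
          rw [← hr, ← htok] at hsc
          rcases hq : bQuant r with _ | ⟨a, b, r'⟩
          · rw [hq] at hsc
            simp only [scanPs, scanUb, scanF, hsc]
            simp
          · have hlq := bQuant_length hq
            rw [hq] at hsc
            simp only [List.nil_append] at hsc
            rw [bScan_acc n r' (by omega) _ false] at hsc
            simp only [scanPs, scanUb, scanF, hsc]
            rw [ih r' (by omega) (m + (tok.length : Int) * a) (M.map (· + (tok.length : Int) * b))]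
            simp only [scanPs, scanUb, scanF, List.cons_append, List.nil_append,
              List.map_cons, List.sum_cons, Bool.false_or, Prod.mk.injEq]
            refine ⟨by ring, ?_⟩
            split
            · rfl
            · cases M <;> simp <;> ring
        · rw [aLoop_unknown c t m M hc hw]
          have hsc := bScan_unknown c t [] false hc hw
          rw [bScan_acc n t (by omega) [] true] at hsc
          simp only [List.nil_append] at hsc
          simp only [scanPs, scanUb, scanF, hsc]
          rw [ih t (by omega) m none]
          simp only [scanPs, scanUb, scanF, Bool.true_or, Prod.mk.injEq]
          constructor
          · simp
          · split <;> simp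

-- ===== VERDICT (by name: the statement is the Claim_ definition above) =====
theorem estimate_island_len_py_spec : Claim_equal_estimate_island_len_py := by
  intro raw _
  unfold Spec_estimate_island_len_py estimate_island_len_py estimate_island_len_py_alt
  rw [main_eq raw.toList.length raw.toList le_rfl 0 (some 0)]
  simp only [scanPs, scanUb, scanF]
  rcases hbs : bScan raw.toList [] false with ⟨ps, ub, f⟩
  split <;> simp [*]
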